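-- pv_equiv track=rewrite | github.com/HansBambel/AdventOfCode_2021 | day_17/day_17.py | project_path
-- ===== SOURCE A (Python) =====
-- from typing import List, Tuple
--
-- def project_path(velocity: Tuple[int, int], y_to: int) -> List[Tuple[int, int]]:
--     y, x = velocity
--     path = []
--     coords = (0, 0)
--     while coords[0] >= y_to:
--         coords = (coords[0] + y, coords[1] + x)
--         path.append(coords)
--         y -= 1
--         x = 0 if x == 0 else x - 1
--     return path
-- ===== SOURCE B (Python) =====
-- def project_path(velocity, y_to):
--     y0, x0 = velocity
--
--     def ypos(n):
--         return n * y0 - n * (n - 1) // 2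
--
--     def xpos(n):
--         if x0 == 0:
--             return 0
--         m = min(n, x0) if x0 > 0 else n
--         return m * x0 - m * (m - 1) // 2
--
--     path = []
--     n = 0
--     while ypos(n) >= y_to:
--         n += 1
--         path.append((ypos(n), xpos(n)))
--     return path
-- ===== Notes on version B (the rewrite author's own statement) =====
-- stated objective: alternative
-- what changed: B replaces the running-velocity simulation by a loop over the step index n that computes each coordinate from the closed triangular-number formulas (y = n*y0 - n(n-1)/2; x capped at m = min(n, x0) when x0 > 0), keeping A's check-then-append termination.
import Mathlib
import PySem

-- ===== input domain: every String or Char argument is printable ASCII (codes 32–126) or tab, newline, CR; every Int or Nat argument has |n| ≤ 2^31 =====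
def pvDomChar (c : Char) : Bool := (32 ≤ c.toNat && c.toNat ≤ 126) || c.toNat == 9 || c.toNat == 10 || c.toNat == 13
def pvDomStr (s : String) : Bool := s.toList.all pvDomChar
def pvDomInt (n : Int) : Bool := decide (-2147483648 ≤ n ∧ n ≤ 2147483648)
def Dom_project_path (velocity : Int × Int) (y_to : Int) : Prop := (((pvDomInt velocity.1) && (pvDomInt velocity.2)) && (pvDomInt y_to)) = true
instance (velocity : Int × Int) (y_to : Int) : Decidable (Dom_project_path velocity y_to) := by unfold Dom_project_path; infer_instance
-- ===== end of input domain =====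

-- B re-implements A's velocity simulation with closed triangular-number formulas per step index; same cost ('alternative').
-- Both loops always terminate in Python; the Lean ports carry a fuel of 2^40, which exceeds the
-- step count for every input in Dom (|ints| ≤ 2^31), so the fuel is never exhausted there.

-- ===== PORT A =====
def pvLoopA (y_to : Int) (fuel : Nat) (coords : Int × Int) (y x : Int)
    (path : List (Int × Int)) : List (Int × Int) :=
  match fuel with
  | 0 => path
  | fuel + 1 =>
    if coords.1 ≥ y_to then
      let c : Int × Int := (coords.1 + y, coords.2 + x)
      pvLoopA y_to fuel c (y - 1) (if x = 0 then 0 else x - 1) (path ++ [c])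
    else path

def project_path (velocity : Int × Int) (y_to : Int) : List (Int × Int) :=
  pvLoopA y_to (2 ^ 40) (0, 0) velocity.1 velocity.2 []

-- ===== PORT B =====
def pvYpos (y0 n : Int) : Int := n * y0 - PySem.Int.floordiv (n * (n - 1)) 2

def pvXpos (x0 n : Int) : Int :=
  if x0 = 0 then 0
  else
    let m : Int := if x0 > 0 then min n x0 else n
    m * x0 - PySem.Int.floordiv (m * (m - 1)) 2

def pvLoopB (y0 x0 y_to : Int) (fuel : Nat) (n : Int)
    (path : List (Int × Int)) : List (Int × Int) :=
  match fuel with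
  | 0 => path
  | fuel + 1 =>
    if pvYpos y0 n ≥ y_to then
      pvLoopB y0 x0 y_to fuel (n + 1) (path ++ [(pvYpos y0 (n + 1), pvXpos x0 (n + 1))])
    else path

def project_path_alt (velocity : Int × Int) (y_to : Int) : List (Int × Int) :=
  pvLoopB velocity.1 velocity.2 y_to (2 ^ 40) 0 []

-- ===== PRECONDITION & SPEC =====
def Spec_project_path (velocity : Int × Int) (y_to : Int) (out : List (Int × Int)) : Prop := out = project_path_alt velocity y_to
instance (velocity : Int × Int) (y_to : Int) (out : List (Int × Int)) : Decidable (Spec_project_path velocity y_to out) := by unfold Spec_project_path; infer_instance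

-- ===== CLAIM (what is proved, stated in full; the proofs are below) =====
def Claim_equal_project_path : Prop := ∀ (velocity : Int × Int) (y_to : Int), Dom_project_path velocity y_to → Spec_project_path velocity y_to (project_path velocity y_to)

-- ===== LEMMAS AND PROOFS =====

-- A's x-velocity after n steps, in closed form.
def pvXvel (x0 n : Int) : Int :=
  if x0 = 0 then 0 else if x0 > 0 then max (x0 - n) 0 else x0 - n

theorem pv_tri_succ (n : Int) :
    PySem.Int.floordiv ((n + 1) * n) 2 = PySem.Int.floordiv (n * (n - 1)) 2 + n := by
  obtain ⟨m, hm⟩ : 2 ∣ n * (n - 1) := by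
    rcases Int.even_or_odd n with ⟨k, hk⟩ | ⟨k, hk⟩
    · exact ⟨k * (n - 1), by rw [hk]; ring⟩
    · exact ⟨n * k, by rw [hk]; ring⟩
  have h2 : (n + 1) * n = 2 * (m + n) := by linear_combination hm
  rw [hm, h2, PySem.Int.floordiv]
  simp [Int.mul_fdiv_cancel_left]

theorem pv_ypos_succ (y0 n : Int) : pvYpos y0 (n + 1) = pvYpos y0 n + (y0 - n) := by
  unfold pvYpos
  have := pv_tri_succ n
  simp only [add_sub_cancel_right] at *
  linear_combination -this

theorem pv_xpos_succ (x0 n : Int) (_hn : 0 ≤ n) :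
    pvXpos x0 (n + 1) = pvXpos x0 n + pvXvel x0 n := by
  unfold pvXpos pvXvel
  by_cases h0 : x0 = 0
  · simp [h0]
  · simp only [h0, if_false]
    by_cases hp : x0 > 0
    · simp only [hp, if_true]
      by_cases hlt : n < x0
      · have h1 : min (n + 1) x0 = n + 1 := by omega
        have h2 : min n x0 = n := by omega
        have h3 : max (x0 - n) 0 = x0 - n := by omega
        rw [h1, h2, h3]
        have := pv_tri_succ n
        simp only [add_sub_cancel_right] at *
        linear_combination -this
      · have h1 : min (n + 1) x0 = x0 := by omega
        have h2 : min n x0 = x0 := by omega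
        have h3 : max (x0 - n) 0 = 0 := by omega
        rw [h1, h2, h3, add_zero]
    · simp only [hp, if_false]
      have := pv_tri_succ n
      simp only [add_sub_cancel_right] at *
      linear_combination -this

theorem pv_xvel_succ (x0 n : Int) (hn : 0 ≤ n) :
    (if pvXvel x0 n = 0 then 0 else pvXvel x0 n - 1) = pvXvel x0 (n + 1) := by
  unfold pvXvel
  by_cases h0 : x0 = 0
  · simp [h0]
  · simp only [h0, if_false]
    by_cases hp : x0 > 0
    · simp only [hp, if_true]
      by_cases hz : max (x0 - n) 0 = 0 <;> simp [hz] <;> omega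
    · simp only [hp, if_false]
      have h1 : x0 - n ≠ 0 := by omega
      simp only [h1, if_false]
      ring

theorem pv_loop_eq (y0 x0 y_to : Int) (fuel : Nat) :
    ∀ (n : Int), 0 ≤ n → ∀ (path : List (Int × Int)),
      pvLoopA y_to fuel (pvYpos y0 n, pvXpos x0 n) (y0 - n) (pvXvel x0 n) path =
        pvLoopB y0 x0 y_to fuel n path := by
  induction fuel with
  | zero => intro n hn path; rfl
  | succ fuel ih =>
    intro n hn path
    rw [pvLoopA, pvLoopB]
    simp only
    by_cases hc : pvYpos y0 n ≥ y_to
    · simp only [hc, if_true]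
      have hy : pvYpos y0 n + (y0 - n) = pvYpos y0 (n + 1) := (pv_ypos_succ y0 n).symm
      have hx : pvXpos x0 n + pvXvel x0 n = pvXpos x0 (n + 1) := (pv_xpos_succ x0 n hn).symm
      rw [hy, hx, pv_xvel_succ x0 n hn]
      have hy' : y0 - n - 1 = y0 - (n + 1) := by omega
      rw [hy']
      exact ih (n + 1) (by omega) _
    · simp only [hc, if_false]

-- ===== VERDICT (by name: the statement is the Claim_ definition above) =====
theorem project_path_spec : Claim_equal_project_path := by
  intro velocity y_to _
  unfold Spec_project_path project_path project_path_alt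
  have h0y : pvYpos velocity.1 0 = 0 := by
    simp [pvYpos, PySem.Int.floordiv]
  have h0x : pvXpos velocity.2 0 = 0 := by
    unfold pvXpos
    split_ifs with h0 hp
    · rfl
    · have hm : min (0:Int) velocity.2 = 0 := by omega
      simp [hm, PySem.Int.floordiv]
    · simp [PySem.Int.floordiv]
  have h0v : pvXvel velocity.2 0 = velocity.2 := by
    unfold pvXvel
    split_ifs with h0 hp
    · omega
    · omega
    · ring
  have := pv_loop_eq velocity.1 velocity.2 y_to (2 ^ 40) 0 le_rfl []
  rw [h0y, h0x, h0v, sub_zero] at this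
  exact this
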